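-- pv_equiv track=rewrite | github.com/rahu2727/grokly | grokly/agents/update_orchestrator.py | _match_module
-- ===== SOURCE A (Python) =====
-- def _match_module(rel_path: str, module_map: dict[str, str]) -> str | None:
--     """Return the module name whose path prefix matches rel_path, or None."""
--     rel = rel_path.replace("\\", "/")
--     # Longest prefix wins (more specific module)
--     best: tuple[int, str] | None = None
--     for prefix, module_name in module_map.items():
--         if rel.startswith(prefix.rstrip("/") + "/") or rel.startswith(prefix):
--             length = len(prefix)
--             if best is None or length > best[0]:
--                 best = (length, module_name)
--     return best[1] if best else None
-- ===== SOURCE B (Python) =====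
-- def _match_module(rel_path: str, module_map: dict[str, str]) -> str | None:
--     """Return the module name whose path prefix matches rel_path, or None."""
--     rel = rel_path.replace("\\", "/")
--     # Stable sort on descending prefix length: the first hit is the longest
--     # matching prefix; ties keep the original iteration order.
--     for prefix, module_name in sorted(module_map.items(),
--                                       key=lambda kv: len(kv[0]), reverse=True):
--         if rel.startswith(prefix.rstrip("/") + "/") or rel.startswith(prefix):
--             return module_name
--     return None
-- ===== Notes on version B (the rewrite author's own statement) =====
-- stated objective: alternative
-- what changed: Replaces the max-tracking accumulator scan with a stable sort of the items on descending prefix length followed by a first-hit scan (ties keep the original dict order, matching A's strict '>' update).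
import Mathlib
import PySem

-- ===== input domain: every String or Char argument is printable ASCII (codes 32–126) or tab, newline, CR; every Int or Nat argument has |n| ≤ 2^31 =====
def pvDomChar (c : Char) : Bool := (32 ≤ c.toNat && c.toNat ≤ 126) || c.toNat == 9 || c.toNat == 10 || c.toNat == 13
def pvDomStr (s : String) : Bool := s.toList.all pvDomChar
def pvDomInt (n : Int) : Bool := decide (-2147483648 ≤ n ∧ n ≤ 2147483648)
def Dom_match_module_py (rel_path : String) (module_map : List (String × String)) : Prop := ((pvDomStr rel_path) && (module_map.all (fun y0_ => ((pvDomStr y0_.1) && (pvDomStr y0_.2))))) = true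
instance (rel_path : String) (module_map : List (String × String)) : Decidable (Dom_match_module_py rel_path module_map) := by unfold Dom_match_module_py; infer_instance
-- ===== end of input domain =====

-- B replaces A's max-tracking scan by a stable sort on descending prefix length
-- followed by a first-hit scan (alternative decomposition, same results).

-- ===== PORT A =====
-- prefix.rstrip("/") — hand port, exact: drop trailing '/' characters only
def pvRstripSlash (s : String) : String :=
  String.ofList ((s.toList.reverse.dropWhile (fun c => c == '/')).reverse)

-- the shared match condition: rel.startswith(prefix.rstrip("/") + "/") or rel.startswith(prefix)
def pvMatch (rel p : String) : Bool :=
  PySem.Str.startswith rel (pvRstripSlash p ++ "/") || PySem.Str.startswith rel p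

def match_module_py (rel_path : String) (module_map : List (String × String)) : Option String :=
  let rel := PySem.Str.replace rel_path "\\" "/"
  let best := module_map.foldl (fun (best : Option (Int × String)) kv =>
    if pvMatch rel kv.1 then
      match best with
      | none => some (PySem.Str.len kv.1, kv.2)
      | some b => if PySem.Str.len kv.1 > b.1 then some (PySem.Str.len kv.1, kv.2) else best
    else best) none
  match best with
  | some b => some b.2
  | none => none

-- ===== PORT B =====
def match_module_py_alt (rel_path : String) (module_map : List (String × String)) : Option String :=
  let rel := PySem.Str.replace rel_path "\\" "/"
  ((PySem.List.sorted module_map (fun kv => PySem.Str.len kv.1) true).find?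
      (fun kv => pvMatch rel kv.1)).map (fun kv => kv.2)

-- ===== PRECONDITION & SPEC =====
def Spec_match_module_py (rel_path : String) (module_map : List (String × String)) (out : Option String) : Prop := out = match_module_py_alt rel_path module_map
instance (rel_path : String) (module_map : List (String × String)) (out : Option String) : Decidable (Spec_match_module_py rel_path module_map out) := by unfold Spec_match_module_py; infer_instance

-- ===== CLAIM (what is proved, stated in full; the proofs are below) =====
def Claim_equal_match_module_py : Prop := ∀ (rel_path : String) (module_map : List (String × String)), Dom_match_module_py rel_path module_map → Spec_match_module_py rel_path module_map (match_module_py rel_path module_map)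

-- ===== LEMMAS AND PROOFS =====

-- insertBy (descending comparator) preserves descending pairwise order
theorem pv_pairwise_insertBy {α : Type} (key : α → Int) (x : α) (s : List α)
    (hs : s.Pairwise (fun a b => key b ≤ key a)) :
    (PySem.List.insertBy (fun a b => decide (key b < key a)) x s).Pairwise
      (fun a b => key b ≤ key a) := by
  induction s with
  | nil => simp [PySem.List.insertBy]
  | cons y t ih =>
    rcases List.pairwise_cons.mp hs with ⟨hy, ht⟩
    by_cases h : key y < key x
    · have hins : PySem.List.insertBy (fun a b => decide (key b < key a)) x (y :: t)
          = x :: y :: t := by simp [PySem.List.insertBy, h]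
      rw [hins]
      refine List.pairwise_cons.mpr ⟨?_, hs⟩
      intro z hz
      rcases List.mem_cons.mp hz with rfl | hz
      · exact le_of_lt h
      · exact le_trans (hy z hz) (le_of_lt h)
    · have hins : PySem.List.insertBy (fun a b => decide (key b < key a)) x (y :: t)
          = y :: PySem.List.insertBy (fun a b => decide (key b < key a)) x t := by
        simp [PySem.List.insertBy, h]
      rw [hins]
      refine List.pairwise_cons.mpr ⟨?_, ih ht⟩
      intro z hz
      rcases (PySem.List.mem_insertBy _ x z t).mp hz with rfl | hz
      · exact le_of_not_gt h
      · exact hy z hz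

-- how find? interacts with insertBy into a descending list
theorem pv_find?_insertBy {α : Type} (key : α → Int) (pred : α → Bool) (x : α) (s : List α)
    (hs : s.Pairwise (fun a b => key b ≤ key a)) :
    (PySem.List.insertBy (fun a b => decide (key b < key a)) x s).find? pred =
      (if pred x then
        match s.find? pred with
        | none => some x
        | some m => if key m < key x then some x else some m
       else s.find? pred) := by
  induction s with
  | nil => cases hx : pred x <;> simp [PySem.List.insertBy, List.find?, hx]
  | cons y t ih =>
    rcases List.pairwise_cons.mp hs with ⟨hy, ht⟩
    by_cases h : key y < key x
    · have hins : PySem.List.insertBy (fun a b => decide (key b < key a)) x (y :: t)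
          = x :: y :: t := by simp [PySem.List.insertBy, h]
      rw [hins]
      cases hx : pred x
      · rw [List.find?_cons_of_neg (by simp [hx])]
        simp
      · rw [List.find?_cons_of_pos (by simp [hx])]
        simp only [if_true]
        cases hft : (y :: t).find? pred with
        | none => rfl
        | some m =>
          have hm : m ∈ y :: t := List.mem_of_find?_eq_some hft
          have hkm : key m < key x := by
            rcases List.mem_cons.mp hm with rfl | hm
            · exact h
            · exact lt_of_le_of_lt (hy m hm) h
          simp [hkm]
    · have hins : PySem.List.insertBy (fun a b => decide (key b < key a)) x (y :: t)
          = y :: PySem.List.insertBy (fun a b => decide (key b < key a)) x t := by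
        simp [PySem.List.insertBy, h]
      rw [hins]
      cases hfy : pred y
      · rw [List.find?_cons_of_neg (by simp [hfy]), ih ht]
        cases hx : pred x <;>
          simp [List.find?_cons_of_neg (p := pred) (l := t) (a := y) (by simp [hfy])]
      · rw [List.find?_cons_of_pos (by simp [hfy]),
            List.find?_cons_of_pos (p := pred) (l := t) (a := y) (by simp [hfy])]
        cases hx : pred x
        · simp
        · simp only [if_true]
          have hnlt : ¬ key y < key x := h
          simp [hnlt]

-- the loop invariant: A's max-tracking fold over the remaining list, started
-- from the state describing a descending accumulator s, equals B's first-hit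
-- lookup after inserting the remaining list into s.
theorem pv_inv {α : Type} (key : α → Int) (val : α → String) (pred : α → Bool)
    (l s : List α) (hs : s.Pairwise (fun a b => key b ≤ key a)) :
    l.foldl (fun (best : Option (Int × String)) x =>
        if pred x then
          match best with
          | none => some (key x, val x)
          | some b => if key x > b.1 then some (key x, val x) else best
        else best)
      ((s.find? pred).map (fun a => (key a, val a))) =
    ((l.foldl (fun acc x =>
        PySem.List.insertBy (fun a b => decide (key b < key a)) x acc) s).find? pred).map
      (fun a => (key a, val a)) := by
  induction l generalizing s with
  | nil => simp
  | cons x l ih =>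
    simp only [List.foldl_cons]
    rw [← ih (PySem.List.insertBy (fun a b => decide (key b < key a)) x s)
          (pv_pairwise_insertBy key x s hs)]
    congr 1
    rw [pv_find?_insertBy key pred x s hs]
    cases hft : s.find? pred with
    | none => cases hx : pred x <;> simp
    | some m =>
      cases hx : pred x
      · simp
      · simp only [if_true, Option.map_some]
        by_cases hlt : key m < key x
        · simp [hlt, gt_iff_lt]
        · simp [hlt, gt_iff_lt]

-- ===== VERDICT (by name: the statement is the Claim_ definition above) =====
theorem match_module_py_spec : Claim_equal_match_module_py := by
  intro rel_path module_map _
  show match_module_py rel_path module_map = match_module_py_alt rel_path module_map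
  simp only [match_module_py, match_module_py_alt]
  have h := pv_inv (fun kv : String × String => PySem.Str.len kv.1) (fun kv => kv.2)
      (fun kv => pvMatch (PySem.Str.replace rel_path "\\" "/") kv.1) module_map [] (by simp)
  simp only [List.find?_nil, Option.map_none] at h
  rw [h, ← PySem.List.sorted_rev_eq_foldl_insertBy module_map
        (fun kv : String × String => PySem.Str.len kv.1)]
  cases (PySem.List.sorted module_map (fun kv : String × String => PySem.Str.len kv.1) true).find?
      (fun kv => pvMatch (PySem.Str.replace rel_path "\\" "/") kv.1) with
  | none => rfl
  | some m => rfl
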